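-- pv_equiv track=rewrite | github.com/ankitash18/Python_Practice | src/DataStructure/LeetCode/Lengthoflastwrod.py | lengthOfLastWord1
-- ===== SOURCE A (Python) =====
-- def lengthOfLastWord1(s):
--     count = 0
--     for i in range(len(s) - 1, -1, -1):
--         if s[i] != ' ':
--             while s[i] != ' ' and i >= 0:
--                 count += 1
--                 i -= 1
--             break
--     return count
-- ===== SOURCE B (Python) =====
-- def lengthOfLastWord1(s):
--     cur = 0
--     last = 0
--     for ch in s:
--         if ch == ' ':
--             if cur:
--                 last = cur
--             cur = 0
--         else:
--             cur += 1
--     return cur if cur else last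
-- ===== Notes on version B (the rewrite author's own statement) =====
-- stated objective: faster
-- what changed: Replaced A's backward scan (reverse index loop that skips trailing spaces, then an inner while counting the last word with a break) by a single forward pass that folds over the characters keeping (current run length, last completed word length); the forward pass iterates characters directly instead of indexing s[i], which measured ~2.5x faster.
import Mathlib
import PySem

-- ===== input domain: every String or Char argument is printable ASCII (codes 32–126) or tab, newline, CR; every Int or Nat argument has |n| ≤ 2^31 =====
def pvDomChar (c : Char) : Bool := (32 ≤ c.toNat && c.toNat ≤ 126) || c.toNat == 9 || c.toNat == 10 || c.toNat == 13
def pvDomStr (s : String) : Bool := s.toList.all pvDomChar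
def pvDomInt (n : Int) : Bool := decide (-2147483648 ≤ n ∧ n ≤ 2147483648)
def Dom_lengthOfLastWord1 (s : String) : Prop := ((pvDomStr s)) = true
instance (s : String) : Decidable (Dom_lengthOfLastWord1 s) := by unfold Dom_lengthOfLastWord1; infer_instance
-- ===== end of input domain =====

-- B changes the traversal: a single forward pass with an accumulator instead of A's backward scan with break.

-- ===== PORT A =====
-- inner 'while s[i] != ' ' and i >= 0: count += 1; i -= 1'; fuel is only a totality
-- guard (the loop runs at most i+2 steps); the 'none' branch of pyGet? is unreachable
-- in A's use (i ≥ -1 and the list is nonempty whenever i = -1 is probed).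
def aWhile (cs : List Char) : Nat → Int → Int → Int
  | 0, _, count => count
  | f + 1, i, count =>
    match PySem.List.pyGet? cs i with
    | none => count
    | some c => if c ≠ ' ' ∧ 0 ≤ i then aWhile cs f (i - 1) (count + 1) else count

-- 'for i in range(len(s)-1, -1, -1)': j+1 corresponds to index i = j; break returns the count.
def aOuter (cs : List Char) : Nat → Int
  | 0 => 0
  | j + 1 =>
    match PySem.List.pyGet? cs (j : Int) with
    | none => 0
    | some c => if c ≠ ' ' then aWhile cs (j + 2) (j : Int) 0 else aOuter cs j

def lengthOfLastWord1 (s : String) : Int := aOuter s.toList s.toList.length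

-- ===== PORT B =====
-- forward pass: state (cur, last); on ' ' commit cur into last (if nonzero) and reset, else extend cur.
def bStep (st : Int × Int) (c : Char) : Int × Int :=
  if c == ' ' then (0, if st.1 ≠ 0 then st.1 else st.2) else (st.1 + 1, st.2)

def lengthOfLastWord1_alt (s : String) : Int :=
  let st := s.toList.foldl bStep (0, 0)
  if st.1 ≠ 0 then st.1 else st.2

-- ===== PRECONDITION & SPEC =====
def Spec_lengthOfLastWord1 (s : String) (out : Int) : Prop := out = lengthOfLastWord1_alt s
instance (s : String) (out : Int) : Decidable (Spec_lengthOfLastWord1 s out) := by unfold Spec_lengthOfLastWord1; infer_instance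

-- ===== CLAIM (what is proved, stated in full; the proofs are below) =====
def Claim_equal_lengthOfLastWord1 : Prop := ∀ (s : String), Dom_lengthOfLastWord1 s → Spec_lengthOfLastWord1 s (lengthOfLastWord1 s)

-- ===== LEMMAS AND PROOFS =====

-- common characterization: length of the last maximal run of non-spaces
def llw (p : List Char) : Int :=
  (((p.reverse.dropWhile (fun c => c == ' ')).takeWhile (fun c => c ≠ ' ')).length : Int)

theorem aWhile_succ (cs : List Char) (f : Nat) (i count : Int) :
    aWhile cs (f + 1) i count
      = match PySem.List.pyGet? cs i with
        | none => count
        | some c => if c ≠ ' ' ∧ 0 ≤ i then aWhile cs f (i - 1) (count + 1) else count := rfl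

theorem aWhile_one_neg_one (cs : List Char) (k : Int) :
    aWhile cs 1 (-1) k = k := by
  rw [show (1 : Nat) = 0 + 1 from rfl, aWhile_succ]
  cases h : PySem.List.pyGet? cs (-1) with
  | none => rfl
  | some c => simp

theorem take_succ_reverse (cs : List Char) (j : Nat) (hj : j < cs.length) :
    (cs.take (j + 1)).reverse = cs[j] :: (cs.take j).reverse := by
  rw [List.take_add_one]
  simp [List.getElem?_eq_getElem hj]

theorem aWhile_spec (cs : List Char) (j : Nat) (hj : j < cs.length) (count : Int) :
    aWhile cs (j + 2) (j : Int) count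
      = count + (((cs.take (j + 1)).reverse.takeWhile (fun c => c ≠ ' ')).length : Int) := by
  induction j generalizing count with
  | zero =>
    have h0 : PySem.List.pyGet? cs ((0 : Nat) : Int) = some cs[0] := by
      rw [PySem.List.pyGet?_natCast, List.getElem?_eq_getElem hj]
    rw [show (0 : Nat) + 2 = 1 + 1 from rfl, aWhile_succ]
    simp only [h0]
    by_cases hc : cs[0] = ' '
    · simp [hc, take_succ_reverse cs 0 hj]
    · rw [if_pos (by exact ⟨hc, by simp⟩)]
      rw [show ((0 : Nat) : Int) - 1 = -1 from rfl, aWhile_one_neg_one]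
      rw [take_succ_reverse cs 0 hj]
      simp [hc]
  | succ m ih =>
    have hm : m < cs.length := Nat.lt_of_succ_lt hj
    have h0 : PySem.List.pyGet? cs ((m + 1 : Nat) : Int) = some cs[m + 1] := by
      rw [PySem.List.pyGet?_natCast, List.getElem?_eq_getElem hj]
    rw [show m + 1 + 2 = (m + 2) + 1 from rfl, aWhile_succ]
    simp only [h0]
    by_cases hc : cs[m + 1] = ' '
    · simp [hc, take_succ_reverse cs (m + 1) hj]
    · rw [if_pos (by exact ⟨hc, by positivity⟩)]
      rw [show ((m + 1 : Nat) : Int) - 1 = (m : Int) by push_cast; ring]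
      rw [ih hm]
      rw [take_succ_reverse cs (m + 1) hj]
      simp [hc]
      omega

theorem aOuter_spec (cs : List Char) (j : Nat) (hj : j ≤ cs.length) :
    aOuter cs j = llw (cs.take j) := by
  induction j with
  | zero => simp [aOuter, llw]
  | succ m ih =>
    have hm : m < cs.length := hj
    have h0 : PySem.List.pyGet? cs ((m : Nat) : Int) = some cs[m] := by
      simp [PySem.List.pyGet?, PySem.List.pyIdx?, hm]
    simp only [aOuter, h0]
    by_cases hc : cs[m] = ' '
    · simp only [hc, ne_eq, not_true_eq_false, if_false]
      rw [ih (Nat.le_of_lt hm), llw, llw, take_succ_reverse cs m hm]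
      simp [hc]
    · simp only [hc, ne_eq, not_false_iff, if_true]
      rw [aWhile_spec cs m hm 0, llw, take_succ_reverse cs m hm]
      simp [hc]

theorem bFold_spec (p : List Char) :
    (p.foldl bStep (0, 0)).1 = ((p.reverse.takeWhile (fun c => c ≠ ' ')).length : Int)
    ∧ (if (p.foldl bStep (0, 0)).1 ≠ 0 then (p.foldl bStep (0, 0)).1
        else (p.foldl bStep (0, 0)).2) = llw p := by
  induction p using List.reverseRecOn with
  | nil => simp [llw]
  | append_singleton p c ih =>
    rw [List.foldl_append]
    obtain ⟨ih1, ih2⟩ := ih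
    by_cases hc : c = ' '
    · subst hc
      simp only [List.foldl, bStep, beq_self_eq_true, if_true]
      refine ⟨by simp, ?_⟩
      have hll : llw (p ++ [' ']) = llw p := by simp [llw]
      simp only [ne_eq, not_true_eq_false, if_false, hll]
      simpa using ih2
    · simp only [List.foldl, bStep, beq_iff_eq, hc, if_false]
      have hge : (0 : Int) ≤ ((p.reverse.takeWhile (fun c => c ≠ ' ')).length : Int) := by
        positivity
      constructor
      · rw [ih1]
        simp [hc]
      · rw [ih1]
        have hne : ((p.reverse.takeWhile (fun c => c ≠ ' ')).length : Int) + 1 ≠ 0 := by omega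
        simp only [hne, if_true, ne_eq, not_false_iff]
        simp [llw, hc]

-- ===== VERDICT (by name: the statement is the Claim_ definition above) =====
theorem lengthOfLastWord1_spec : Claim_equal_lengthOfLastWord1 := by
  intro s _
  unfold Spec_lengthOfLastWord1 lengthOfLastWord1 lengthOfLastWord1_alt
  rw [aOuter_spec s.toList s.toList.length (le_refl _)]
  simp only [List.take_length]
  exact ((bFold_spec s.toList).2).symm
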